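-- pv_equiv track=rewrite | github.com/SlamaFR/AP2 | TD/TD3/Ex 5.py | nombres_croissants
-- ===== SOURCE A (Python) =====
-- def nombres_croissants(n, liste=None):
--     """
--     Retourne une liste de 1 à n dans l'ordre croissant.
--     :param n: Entier n.
--     :param liste: Liste des entiers.
--     :return: Liste des entiers finale.
--
--     >>> nombres_croissants(4)
--     [1, 2, 3, 4]
--     """
--     if liste is None:
--         liste = list()
--
--     if len(liste) < n:
--         liste.append(len(liste) + 1)
--         return nombres_croissants(n, liste)
--     else:
--         return liste
-- ===== SOURCE B (Python) =====
-- def nombres_croissants(n, liste=None):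
--     if liste is None:
--         liste = list()
--     liste.extend(range(len(liste) + 1, n + 1))
--     return liste
-- ===== Notes on version B (the rewrite author's own statement) =====
-- stated objective: simpler
-- what changed: Replaces the tail recursion that appends one element per call with a single extend by range(len(liste)+1, n+1), computed in one step and without recursion depth limits.
import Mathlib
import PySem

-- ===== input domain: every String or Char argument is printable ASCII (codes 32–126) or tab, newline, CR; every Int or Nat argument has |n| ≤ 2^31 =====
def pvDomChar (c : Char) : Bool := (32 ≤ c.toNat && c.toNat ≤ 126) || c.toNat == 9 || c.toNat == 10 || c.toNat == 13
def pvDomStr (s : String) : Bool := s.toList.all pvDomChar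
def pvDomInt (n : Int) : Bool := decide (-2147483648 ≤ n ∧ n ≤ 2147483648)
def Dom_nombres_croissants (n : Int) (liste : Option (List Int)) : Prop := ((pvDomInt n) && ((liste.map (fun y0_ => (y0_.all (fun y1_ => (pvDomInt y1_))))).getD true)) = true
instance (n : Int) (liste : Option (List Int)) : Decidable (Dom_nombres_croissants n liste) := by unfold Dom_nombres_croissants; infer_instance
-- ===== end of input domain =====

-- B replaces A's one-append-per-call tail recursion by a single extend with range(len+1, n+1): simpler, same values.
-- A mutates a passed-in list in place (appends); B performs the same mutation via extend. The theorems are about the return value.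

-- ===== PORT A =====
def nombres_croissants (n : Int) (liste : Option (List Int)) : List Int :=
  if (((liste.getD []).length : Int) < n) then
    nombres_croissants n (some ((liste.getD []) ++ [((liste.getD []).length : Int) + 1]))
  else
    liste.getD []
termination_by (n - (liste.getD []).length).toNat
decreasing_by simp; omega

-- ===== PORT B =====
def nombres_croissants_alt (n : Int) (liste : Option (List Int)) : List Int :=
  let l := liste.getD []
  l ++ PySem.List.pyRange ((l.length : Int) + 1) (n + 1) 1

-- ===== PRECONDITION & SPEC =====
-- Pre_ excludes inputs needing more than 900 recursive calls (n - len(liste) > 900), on which CPython's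
-- A hits the interpreter recursion limit and raises RecursionError; the bound 900 is conservatively below
-- the machine limit, so A may still return between 900 and the limit.
def Pre_nombres_croissants (n : Int) (liste : Option (List Int)) : Prop :=
  n ≤ ((liste.getD []).length : Int) + 900
instance (n : Int) (liste : Option (List Int)) : Decidable (Pre_nombres_croissants n liste) := by
  unfold Pre_nombres_croissants; infer_instance
def pvWitness_nombres_croissants : Int × Option (List Int) := (4, none)
def Spec_nombres_croissants (n : Int) (liste : Option (List Int)) (out : List Int) : Prop := out = nombres_croissants_alt n liste
instance (n : Int) (liste : Option (List Int)) (out : List Int) : Decidable (Spec_nombres_croissants n liste out) := by unfold Spec_nombres_croissants; infer_instance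

-- ===== CLAIM (what is proved, stated in full; the proofs are below) =====
def Claim_equal_nombres_croissants : Prop := ∀ (n : Int) (liste : Option (List Int)), Dom_nombres_croissants n liste → Pre_nombres_croissants n liste → Spec_nombres_croissants n liste (nombres_croissants n liste)

-- ===== LEMMAS AND PROOFS =====

theorem nc_key (k : Nat) : ∀ (n : Int) (liste : Option (List Int)),
    (n - (liste.getD []).length).toNat ≤ k →
    nombres_croissants n liste =
      (liste.getD []) ++ PySem.List.pyRange (((liste.getD []).length : Int) + 1) (n + 1) 1 := by
  induction k with
  | zero =>
    intro n liste h
    rw [nombres_croissants.eq_def, if_neg (by omega),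
      PySem.List.pyRange_one_eq_nil (by omega)]
    simp
  | succ k ih =>
    intro n liste h
    rw [nombres_croissants.eq_def]
    by_cases hlt : (((liste.getD []).length : Int) < n)
    · rw [if_pos hlt,
        ih n (some ((liste.getD []) ++ [((liste.getD []).length : Int) + 1]))
          (by simp only [Option.getD_some, List.length_append, List.length_cons,
                List.length_nil]; omega),
        PySem.List.pyRange_one_cons (show ((liste.getD []).length : Int) + 1 < n + 1 by omega)]
      simp only [Option.getD_some, List.length_append, List.length_cons, List.length_nil,
        List.append_assoc, List.cons_append, List.nil_append]
      push_cast
      ring_nf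
    · rw [if_neg hlt, PySem.List.pyRange_one_eq_nil (by omega)]
      simp

-- ===== VERDICT (by name: the statement is the Claim_ definition above) =====
theorem nombres_croissants_spec : Claim_equal_nombres_croissants := by
  intro n liste _ _
  unfold Spec_nombres_croissants nombres_croissants_alt
  exact nc_key (n - (liste.getD []).length).toNat n liste (le_refl _)
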